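-- pv_equiv track=rewrite | github.com/photocyte/copier-python-package-template | .github/workflows/hash_git_files.py | find_devcontainer_hash_line
-- ===== SOURCE A (Python) =====
-- DEVCONTAINER_COMMENT_LINE_PREFIX = (
--     "  // Devcontainer context hash (do not manually edit this, it's managed by a pre-commit hook): "
-- )
--
-- def find_devcontainer_hash_line(lines: list[str]) -> tuple[int, str | None]:
--     """Find the line index and current hash in the devcontainer.json file."""
--     for i in range(len(lines) - 1, -1, -1):
--         if lines[i].strip() == "}":
--             # Check the line above it
--             if i > 0:
--                 above_line = lines[i - 1]
--                 if above_line.startswith(DEVCONTAINER_COMMENT_LINE_PREFIX):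
--                     part_after_prefix = above_line.split(": ", 1)[1]
--                     part_before_suffix = part_after_prefix.split("#")[0]
--                     current_hash = part_before_suffix.strip()
--                     return i - 1, current_hash
--             return i, None
--     return -1, None
-- ===== SOURCE B (Python) =====
-- DEVCONTAINER_COMMENT_LINE_PREFIX = (
--     "  // Devcontainer context hash (do not manually edit this, it's managed by a pre-commit hook): "
-- )
--
-- def find_devcontainer_hash_line(lines: list[str]) -> tuple[int, str | None]:
--     """Find the line index and current hash in the devcontainer.json file."""
--     # Single forward pass with an accumulator: walk the lines once, remembering the
--     # previous line; at every closing brace compute the answer eagerly and overwrite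
--     # the accumulator, so the value kept at the end is the one for the last brace.
--     result: tuple[int, str | None] = (-1, None)
--     prev: str | None = None
--     for idx, line in enumerate(lines):
--         if line.strip() == "}":
--             if prev is not None and prev.startswith(DEVCONTAINER_COMMENT_LINE_PREFIX):
--                 result = (idx - 1, prev.split(": ", 1)[1].split("#")[0].strip())
--             else:
--                 result = (idx, None)
--         prev = line
--     return result
-- ===== Notes on version B (the rewrite author's own statement) =====
-- stated objective: alternative
-- what changed: Replaces A's backward early-return index scan with a single forward fold over enumerate(lines) carrying an accumulator (candidate answer, previous line): the answer is recomputed at each closing brace and the last one wins, with no indexing into the list at all.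
import Mathlib
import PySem

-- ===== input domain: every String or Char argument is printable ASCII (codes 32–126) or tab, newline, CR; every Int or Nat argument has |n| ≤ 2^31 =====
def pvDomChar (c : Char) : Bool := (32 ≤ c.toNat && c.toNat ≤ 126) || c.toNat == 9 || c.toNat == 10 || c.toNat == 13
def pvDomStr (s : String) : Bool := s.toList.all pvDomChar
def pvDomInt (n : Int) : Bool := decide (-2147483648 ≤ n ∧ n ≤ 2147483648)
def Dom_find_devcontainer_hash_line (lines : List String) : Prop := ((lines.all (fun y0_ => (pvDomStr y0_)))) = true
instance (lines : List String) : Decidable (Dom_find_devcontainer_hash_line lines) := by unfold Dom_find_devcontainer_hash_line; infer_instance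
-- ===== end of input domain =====

set_option maxHeartbeats 1000000


-- B replaces A's backward early-return scan by one forward fold with an accumulator:
-- it remembers the previous line and overwrites the candidate answer at every closing
-- brace, so the value left at the end is the one for the last brace (alternative decomposition).

def pvPrefix : String :=
  "  // Devcontainer context hash (do not manually edit this, it's managed by a pre-commit hook): "

-- ===== PORT A =====
-- the backward loop 'for i in range(len(lines)-1, -1, -1)', early return on the first match
def pvAGo (lines : List String) : List Int → Int × Option String
  | [] => (-1, none)
  | i :: rest =>
    if PySem.Str.strip (PySem.List.pyGetD lines i "") = "}" then
      if i > 0 then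
        let above_line := PySem.List.pyGetD lines (i - 1) ""
        if PySem.Str.startswith above_line pvPrefix then
          let part_after_prefix :=
            PySem.List.pyGetD ((PySem.Str.splitMax? above_line ": " 1).getD []) 1 ""
          let part_before_suffix :=
            PySem.List.pyGetD ((PySem.Str.split? part_after_prefix "#").getD []) 0 ""
          (i - 1, some (PySem.Str.strip part_before_suffix))
        else (i, none)
      else (i, none)
    else pvAGo lines rest

def find_devcontainer_hash_line (lines : List String) : Int × Option String :=
  pvAGo lines (PySem.List.pyRange ((lines.length : Int) - 1) (-1) (-1))

-- ===== PORT B =====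
-- one step of B's forward loop: state = (result so far, previous line)
def pvBStep (st : (Int × Option String) × Option String) (p : Int × String) :
    (Int × Option String) × Option String :=
  let res :=
    if PySem.Str.strip p.2 = "}" then
      match st.2 with
      | some prev =>
        if PySem.Str.startswith prev pvPrefix then
          (p.1 - 1, some (PySem.Str.strip (PySem.List.pyGetD
            ((PySem.Str.split? (PySem.List.pyGetD
              ((PySem.Str.splitMax? prev ": " 1).getD []) 1 "") "#").getD []) 0 "")))
        else (p.1, none)
      | none => (p.1, none)
    else st.1
  (res, some p.2)

def find_devcontainer_hash_line_alt (lines : List String) : Int × Option String :=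
  ((PySem.List.enumerate lines 0).foldl pvBStep ((-1, none), none)).1

-- ===== PRECONDITION & SPEC =====
def Spec_find_devcontainer_hash_line (lines : List String) (out : Int × Option String) : Prop := out = find_devcontainer_hash_line_alt lines
instance (lines : List String) (out : Int × Option String) : Decidable (Spec_find_devcontainer_hash_line lines out) := by unfold Spec_find_devcontainer_hash_line; infer_instance

-- ===== CLAIM =====
def Claim_equal_find_devcontainer_hash_line : Prop := ∀ (lines : List String), Dom_find_devcontainer_hash_line lines → Spec_find_devcontainer_hash_line lines (find_devcontainer_hash_line lines)

-- ===== LEMMAS AND PROOFS =====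

-- proof helper: the answer extracted at a brace found at index i (A's if-chain)
def pvAtLast (lines : List String) (i : Int) : Int × Option String :=
  if i > 0 then
    let above_line := PySem.List.pyGetD lines (i - 1) ""
    if PySem.Str.startswith above_line pvPrefix then
      (i - 1, some (PySem.Str.strip (PySem.List.pyGetD
        ((PySem.Str.split? (PySem.List.pyGetD
          ((PySem.Str.splitMax? above_line ": " 1).getD []) 1 "") "#").getD []) 0 "")))
    else (i, none)
  else (i, none)

-- proof helper: common characterization — the extraction at the last closing-brace index
def pvSpecF (lines : List String) : Int × Option String :=
  match ((PySem.List.pyRange 0 (lines.length : Int) 1).filter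
      (fun i => PySem.Str.strip (PySem.List.pyGetD lines i "") == "}")).getLast? with
  | none => (-1, none)
  | some i => pvAtLast lines i

theorem pvGetD_append_lt (l : List String) (x : String) (i : Int) (d : String)
    (h0 : 0 ≤ i) (h : i < (l.length : Int)) :
    PySem.List.pyGetD (l ++ [x]) i d = PySem.List.pyGetD l i d := by
  rw [PySem.List.pyGetD_eq_getElem (l ++ [x]) d h0 (by simp; omega),
      PySem.List.pyGetD_eq_getElem l d h0 h]
  exact List.getElem_append_left (by omega)

theorem pvGetD_concat_len (l : List String) (x : String) (d : String) :
    PySem.List.pyGetD (l ++ [x]) (l.length : Int) d = x := by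
  rw [PySem.List.pyGetD_eq_getElem (l ++ [x]) d (by positivity) (by simp)]
  simp

theorem pvAtLast_append (l : List String) (x : String) (i : Int)
    (h : i < (l.length : Int)) : pvAtLast (l ++ [x]) i = pvAtLast l i := by
  unfold pvAtLast
  split_ifs with hi
  · rw [pvGetD_append_lt l x (i - 1) "" (by omega) (by omega)]
  · rfl

theorem pvFilter_append (l : List String) (x : String) :
    ((PySem.List.pyRange 0 (l.length : Int) 1).filter
        (fun i => PySem.Str.strip (PySem.List.pyGetD (l ++ [x]) i "") == "}")) =
    ((PySem.List.pyRange 0 (l.length : Int) 1).filter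
        (fun i => PySem.Str.strip (PySem.List.pyGetD l i "") == "}")) := by
  apply List.filter_congr
  intro i hi
  have := (PySem.List.mem_pyRange_one).mp hi
  rw [pvGetD_append_lt l x i "" this.1 this.2]

theorem pvBStep_snd (st : (Int × Option String) × Option String) (p : Int × String) :
    (pvBStep st p).2 = some p.2 := rfl

theorem pvBStep_fst_some (st : (Int × Option String) × Option String) (p : Int × String)
    (prev : String) (h2 : st.2 = some prev) (hx : PySem.Str.strip p.2 = "}") :
    (pvBStep st p).1 =
      if PySem.Str.startswith prev pvPrefix then
        (p.1 - 1, some (PySem.Str.strip (PySem.List.pyGetD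
          ((PySem.Str.split? (PySem.List.pyGetD
            ((PySem.Str.splitMax? prev ": " 1).getD []) 1 "") "#").getD []) 0 "")))
      else (p.1, none) := by
  simp [pvBStep, hx, h2]

-- A's backward scan over the reverse of any index list = the last-match characterization
theorem pvAGo_reverse (lines : List String) (l : List Int) :
    pvAGo lines l.reverse =
      match (l.filter
          (fun i => PySem.Str.strip (PySem.List.pyGetD lines i "") == "}")).getLast? with
      | none => (-1, none)
      | some i => pvAtLast lines i := by
  induction l using List.reverseRecOn with
  | nil => simp [pvAGo]
  | append_singleton l x ih =>
    rw [List.reverse_append, List.reverse_singleton, List.filter_append, List.filter_singleton]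
    simp only [List.singleton_append, pvAGo]
    by_cases hx : PySem.Str.strip (PySem.List.pyGetD lines x "") = "}"
    · have hb : (PySem.Str.strip (PySem.List.pyGetD lines x "") == "}") = true := by
        simpa using hx
      rw [if_pos hx, hb, cond_true, List.getLast?_concat]
      simp only [pvAtLast]
    · have hb : (PySem.Str.strip (PySem.List.pyGetD lines x "") == "}") = false := by
        simpa using hx
      rw [if_neg hx, hb, cond_false, List.append_nil]
      exact ih

theorem pvA_eq (lines : List String) : find_devcontainer_hash_line lines = pvSpecF lines := by
  unfold find_devcontainer_hash_line pvSpecF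
  have h : PySem.List.pyRange ((lines.length : Int) - 1) (-1) (-1) =
      (PySem.List.pyRange 0 (lines.length : Int) 1).reverse := by
    rw [PySem.List.pyRange_neg_one_eq_reverse]
    norm_num
  rw [h]
  exact pvAGo_reverse lines (PySem.List.pyRange 0 (lines.length : Int) 1)

theorem pvB_eq (lines : List String) : find_devcontainer_hash_line_alt lines = pvSpecF lines := by
  induction lines using List.reverseRecOn with
  | nil =>
    simp [find_devcontainer_hash_line_alt, pvSpecF, PySem.List.enumerate,
      PySem.List.pyRange_one_eq_nil]
  | append_singleton l x ih =>
    unfold find_devcontainer_hash_line_alt at ih ⊢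
    rw [PySem.List.enumerate_append, List.foldl_append]
    have hrange : PySem.List.pyRange 0 ((l ++ [x]).length : Int) 1 =
        PySem.List.pyRange 0 (l.length : Int) 1 ++ [(l.length : Int)] := by
      have : ((l ++ [x]).length : Int) = (l.length : Int) + 1 := by simp
      rw [this, PySem.List.pyRange_one_succ_right (by positivity)]
    have henx : PySem.List.enumerate [x] ((0 : Int) + l.length) = [((l.length : Int), x)] := by
      simp [PySem.List.enumerate_cons, PySem.List.enumerate_nil]
    rw [henx]
    unfold pvSpecF
    rw [hrange, List.filter_append, List.filter_singleton, pvGetD_concat_len, pvFilter_append]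
    simp only [List.foldl_cons, List.foldl_nil]
    by_cases hx : PySem.Str.strip x = "}"
    · have hb : (PySem.Str.strip x == "}") = true := by simpa using hx
      rw [hb, cond_true, List.getLast?_concat]
      -- answer is decided at the last brace, index l.length
      cases l using List.reverseRecOn with
      | nil =>
        simp [pvBStep, pvAtLast, hx, PySem.List.enumerate]
      | append_singleton l' p =>
        rw [PySem.List.enumerate_append, List.foldl_append]
        have henp : PySem.List.enumerate [p] ((0 : Int) + l'.length) = [((l'.length : Int), p)] := by
          simp [PySem.List.enumerate_cons, PySem.List.enumerate_nil]
        rw [henp]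
        simp only [List.foldl_cons, List.foldl_nil]
        have habove : PySem.List.pyGetD ((l' ++ [p]) ++ [x]) (((l' ++ [p]).length : Int) - 1) ""
            = p := by
          have h1 : ((l' ++ [p]).length : Int) - 1 = (l'.length : Int) := by simp
          rw [h1, pvGetD_append_lt (l' ++ [p]) x _ "" (by positivity) (by simp),
            pvGetD_concat_len]
        have hpos : ((l' ++ [p]).length : Int) > 0 := by simp
        have h2 : (pvBStep ((PySem.List.enumerate l' 0).foldl pvBStep ((-1, none), none))
            ((l'.length : Int), p)).2 = some p := pvBStep_snd _ _
        rw [pvBStep_fst_some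
          (pvBStep ((PySem.List.enumerate l' 0).foldl pvBStep ((-1, none), none))
            ((l'.length : Int), p))
          ((((l' ++ [p]).length : Int)), x) p h2 hx]
        unfold pvAtLast
        rw [if_pos hpos, habove]
    · have hb : (PySem.Str.strip x == "}") = false := by simpa using hx
      rw [hb, cond_false, List.append_nil]
      have hres : (pvBStep ((PySem.List.enumerate l 0).foldl pvBStep ((-1, none), none))
          ((l.length : Int), x)).1
          = ((PySem.List.enumerate l 0).foldl pvBStep ((-1, none), none)).1 := by
        simp [pvBStep, hx]
      rw [hres, ih]
      unfold pvSpecF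
      cases hlast : ((PySem.List.pyRange 0 (l.length : Int) 1).filter
          (fun i => PySem.Str.strip (PySem.List.pyGetD l i "") == "}")).getLast? with
      | none => rfl
      | some i =>
        have hmem : i ∈ (PySem.List.pyRange 0 (l.length : Int) 1).filter
            (fun j => PySem.Str.strip (PySem.List.pyGetD l j "") == "}") :=
          List.mem_of_getLast? hlast
        have hi := (PySem.List.mem_pyRange_one).mp (List.mem_of_mem_filter hmem)
        simp only
        rw [pvAtLast_append l x i hi.2]

-- ===== VERDICT =====
theorem find_devcontainer_hash_line_spec : Claim_equal_find_devcontainer_hash_line := by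
  intro lines _
  unfold Spec_find_devcontainer_hash_line
  exact (pvA_eq lines).trans (pvB_eq lines).symm
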